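-- pv_equiv track=rewrite | github.com/taylorperkins/foobar | logic/the_cake_is_not_a_lie.py | answer
-- ===== SOURCE A (Python) =====
-- from operator import itemgetter
--
-- def answer(s):
--     """function called answer(s) that, given a non-empty string less than 200 characters in length describing
--     the sequence of M&Ms, returns the maximum number of equal parts that can be cut from the cake without
--     leaving any leftovers.
--
--     Steps to solving this problem:
--         1. Initialize an empty dictionary to hold my values.
--             _hash = {
--                 seq: (count_of_seq_instances, num_of_remaining_letters),
--                 ...
--             }
--
--         2. Iterate over the length of the string. I want to be able to grab each unique permutation, and base the
--             length of the permutation from this loop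
--         3. Iterate again to create the steps for each permutation. Example:
--             given 'aabbc',
--             'aa', 'ab', 'bb', ..
--         4. Extract the sequence from the phrase s based on i and j
--         5. If we have seen this hash in the iteration before, continue over it
--         6. Otherwise, determine how many times this sequence shows up in the phrase, as well as the leftover
--             character count
--         7. assign the values to the initialized hash
--         8. First sort the hash by the amount of remaining characters. If there is a sequence with 0 remaining characters
--             it has higher priority
--         9. Then sort by the length of the sequence where the length of the remainder is equal to the highest sorted
--             sequence
--         10. return solution
--
--
--     :param s:
--     :return:
--     """
--     solution = 0
--     # your code here
--     if s and len(s) < 200: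
--         # I really only need to store the length of the sequence (key),
--         # how many times it was found, and the leftover amt
--         _hash = dict()
--         _range = len(s)
--
--         for i in range(1, _range):
--             for j in range(0, _range):
--                 seq = s[j:j + i]
--
--                 if _hash.get(seq):
--                     continue
--
--                 else:
--                     seq_count = s.count(seq)
--                     remaining_letters = _range - i*seq_count
--
--                     _hash[seq] = (seq_count, remaining_letters)
--
--         sorted_by_remainders = sorted(_hash.values(), key=itemgetter(1))
--         solution = max({
--             seq_values[0] for seq_values in sorted_by_remainders
--             if seq_values[1] == sorted_by_remainders[0][1]
--         })
--
--     return solution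
-- ===== SOURCE B (Python) =====
-- def answer(s):
--     # Per-length aggregation: for each part length i, only the most frequent substring
--     # of that length can realise the minimal leftover, and the counts tying the global
--     # minimal leftover are exactly the per-length maximal counts whose leftover ties it.
--     # So no substring dictionary/dedup and no sort: one pair (leftover, count) per length,
--     # folded into a running best (min leftover, then max count).
--     n = len(s)
--     if not (s and n < 200):
--         return 0
--     best = None  # (leftover, count)
--     for i in range(1, n):
--         maxc = max(s.count(s[j:j + i]) for j in range(n - i + 1))
--         rem = n - i * maxc
--         if best is None or rem < best[0] or (rem == best[0] and maxc > best[1]):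
--             best = (rem, maxc)
--     return best[1] if best is not None else 0
-- ===== Notes on version B (the rewrite author's own statement) =====
-- stated objective: alternative
-- what changed: Replaces A's dedup-dict of every distinct substring plus sort-and-select by a per-length aggregation: for each part length i it computes only the maximal count among length-i substrings and folds the single pair (leftover, count) per length into a running best, justified by the identity that the counts tying the minimal leftover are exactly the per-length maximal counts whose leftover ties it.
import Mathlib
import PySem

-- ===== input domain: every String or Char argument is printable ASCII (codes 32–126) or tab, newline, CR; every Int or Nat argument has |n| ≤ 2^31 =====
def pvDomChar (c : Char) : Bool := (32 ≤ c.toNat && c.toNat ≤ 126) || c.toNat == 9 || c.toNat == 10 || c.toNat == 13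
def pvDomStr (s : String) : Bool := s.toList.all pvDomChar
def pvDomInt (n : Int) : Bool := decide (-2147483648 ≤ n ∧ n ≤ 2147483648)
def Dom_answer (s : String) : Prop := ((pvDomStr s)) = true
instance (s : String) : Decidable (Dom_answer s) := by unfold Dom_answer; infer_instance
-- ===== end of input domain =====

-- B replaces A's dedup-dict over all substrings plus sort-and-select by a per-length
-- aggregation (one maximal count per part length, folded into a running best): alternative
-- algorithm of similar cost.

-- ===== PORT A =====
-- s[j:j+i], the substring both programs take
def subAt (s : String) (j i : Int) : String := PySem.Str.slice s (some j) (some (j + i))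

-- inner-loop body of A: one (i, j) step on the dict (Python's truthiness test
-- `if _hash.get(seq)` is `isSome` here: the stored values are nonempty tuples, always truthy)
def answerBodyA (s : String) (n : Int) (d : PySem.Dict String (Int × Int)) (i j : Int) :
    PySem.Dict String (Int × Int) :=
  let seq := subAt s j i
  if (d.get? seq).isSome then d
  else
    let c : Int := (PySem.Str.count s seq : Int)
    d.insert seq (c, n - i * c)

def answer (s : String) : Int :=
  if s ≠ "" ∧ PySem.Str.len s < 200 then
    let n : Int := PySem.Str.len s
    let h : PySem.Dict String (Int × Int) :=
      (PySem.List.pyRange 1 n 1).foldl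
        (fun d i => (PySem.List.pyRange 0 n 1).foldl (fun d j => answerBodyA s n d i j) d)
        PySem.Dict.empty
    let sortedByRemainders := PySem.List.sorted h.values (fun p => p.2) false
    match sortedByRemainders with
    | [] => 0   -- Python: max() of the empty set raises ValueError; outside Pre_answer
    | m :: t =>
      match PySem.List.max?
          (PySem.Set.ofList (((m :: t).filter (fun p => p.2 == m.2)).map (fun p => p.1)))
          (fun x => x) with
      | some mx => mx
      | none => 0   -- unreachable: the set contains m.1
  else 0

-- ===== PORT B =====
-- max(s.count(s[j:j+i]) for j in range(n - i + 1)) : the maximal count among length-i parts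
def answerMaxc (s : String) (n i : Int) : Int :=
  match PySem.List.max?
      ((PySem.List.pyRange 0 (n - i + 1) 1).map (fun j => (PySem.Str.count s (subAt s j i) : Int)))
      (fun x => x) with
  | some m => m
  | none => 0   -- unreachable for i < n: range(0, n-i+1) is nonempty

-- B's running-best update: `if best is None or rem < best[0] or (rem == best[0] and maxc > best[1])`
def answerUpd (b : Option (Int × Int)) (rem c : Int) : Option (Int × Int) :=
  match b with
  | none => some (rem, c)
  | some (br, bc) => if rem < br ∨ (rem = br ∧ bc < c) then some (rem, c) else some (br, bc)

def answer_alt (s : String) : Int :=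
  if s ≠ "" ∧ PySem.Str.len s < 200 then
    let n : Int := PySem.Str.len s
    match (PySem.List.pyRange 1 n 1).foldl
        (fun b i => answerUpd b (n - i * answerMaxc s n i) (answerMaxc s n i)) none with
    | some (_, c) => c
    | none => 0
  else 0

-- ===== PRECONDITION & SPEC =====
-- Pre_ excludes exactly the length-1 strings: there the length loop range(1,1) is empty and
-- Python's A raises ValueError (max() of an empty set).
def Pre_answer (s : String) : Prop := PySem.Str.len s ≠ 1
instance (s : String) : Decidable (Pre_answer s) := by unfold Pre_answer; infer_instance
def pvWitness_answer : String := "abab"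

def Spec_answer (s : String) (out : Int) : Prop := out = answer_alt s
instance (s : String) (out : Int) : Decidable (Spec_answer s out) := by unfold Spec_answer; infer_instance

-- ===== CLAIM (what is proved, stated in full; the proofs are below) =====
def Claim_equal_answer : Prop := ∀ (s : String), Dom_answer s → Pre_answer s → Spec_answer s (answer s)

-- ===== LEMMAS AND PROOFS =====

-- B's best, recomputed from a list of (count, remaining) pairs
def extractBest (vs : List (Int × Int)) : Option (Int × Int) :=
  vs.foldl (fun b p => answerUpd b p.2 p.1) none

-- the n-1 candidate pairs B aggregates, one per part length
def bPairs (s : String) (n : Int) : List (Int × Int) :=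
  (PySem.List.pyRange 1 n 1).map (fun i => (answerMaxc s n i, n - i * answerMaxc s n i))

-- what A's dict stores for each item: the key is a proper substring recorded at its own
-- length, the value its count and leftover at that length
def ValOK (s : String) (p : String × (Int × Int)) : Prop :=
  p.2.1 = (PySem.Str.count s p.1 : Int) ∧
  p.2.2 = PySem.Str.len s - PySem.Str.len p.1 * p.2.1 ∧
  1 ≤ PySem.Str.len p.1 ∧ PySem.Str.len p.1 < PySem.Str.len s ∧
  ∃ j : Int, 0 ≤ j ∧ j + PySem.Str.len p.1 ≤ PySem.Str.len s ∧ p.1 = subAt s j (PySem.Str.len p.1)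

def InvD (s : String) (d : PySem.Dict String (Int × Int)) : Prop := ∀ p ∈ d.items, ValOK s p

-- every substring of length ≤ m is already a key
def ComplD (s : String) (m : Int) (d : PySem.Dict String (Int × Int)) : Prop :=
  ∀ ℓ j : Int, 1 ≤ ℓ → ℓ ≤ m → 0 ≤ j → j + ℓ ≤ PySem.Str.len s → subAt s j ℓ ∈ d.keys

-- A's dict after the outer loop has processed lengths 1..m-1
def dAfter (s : String) (m : Int) : PySem.Dict String (Int × Int) :=
  (PySem.List.pyRange 1 m 1).foldl
    (fun d i => (PySem.List.pyRange 0 (PySem.Str.len s) 1).foldl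
      (fun d j => answerBodyA s (PySem.Str.len s) d i j) d)
    PySem.Dict.empty

theorem len_subAt (s : String) (j i : Int) (hj : 0 ≤ j) (hi : 0 ≤ i)
    (h : j + i ≤ PySem.Str.len s) : PySem.Str.len (subAt s j i) = i := by
  have hL := PySem.Str.len_eq s
  unfold subAt
  rw [PySem.Str.len_eq, PySem.Str.toList_slice, PySem.Chars.slice_eq_listSlice,
      PySem.List.slice_toNat _ hj (by omega)]
  rw [List.length_take, List.length_drop]
  omega

theorem subAt_clamp (s : String) (j i : Int) (hj : 0 ≤ j) (hjn : j ≤ PySem.Str.len s)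
    (h : PySem.Str.len s ≤ j + i) : subAt s j i = subAt s j (PySem.Str.len s - j) := by
  have _hL := PySem.Str.len_eq s
  apply String.toList_inj.mp
  unfold subAt
  rw [PySem.Str.toList_slice, PySem.Str.toList_slice, PySem.Chars.slice_eq_listSlice,
      PySem.Chars.slice_eq_listSlice, PySem.List.slice_toNat _ hj (by omega),
      PySem.List.slice_toNat _ hj (by omega),
      List.take_of_length_le (by rw [List.length_drop]; omega),
      List.take_of_length_le (by rw [List.length_drop]; omega)]

-- the nonempty mapped count list behind answerMaxc
theorem maxcList_ne_nil (s : String) (n i : Int) (h2 : i < n) :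
    (PySem.List.pyRange 0 (n - i + 1) 1).map (fun j => (PySem.Str.count s (subAt s j i) : Int)) ≠ [] := by
  rw [PySem.List.pyRange_one_cons (show (0:Int) < n - i + 1 by omega)]
  simp

theorem answerMaxc_exists (s : String) (n i : Int) (h2 : i < n) :
    ∃ j : Int, 0 ≤ j ∧ j + i ≤ n ∧ answerMaxc s n i = (PySem.Str.count s (subAt s j i) : Int) := by
  unfold answerMaxc
  cases hmx : PySem.List.max?
      ((PySem.List.pyRange 0 (n - i + 1) 1).map (fun j => (PySem.Str.count s (subAt s j i) : Int)))
      (fun x => x) with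
  | none =>
    exact absurd ((PySem.List.max?_eq_none_iff _ _).mp hmx) (maxcList_ne_nil s n i h2)
  | some m =>
    obtain ⟨j, hjr, hje⟩ := List.mem_map.mp (PySem.List.max?_mem hmx)
    obtain ⟨hj0, hj1⟩ := PySem.List.mem_pyRange_one.mp hjr
    exact ⟨j, hj0, by omega, hje.symm⟩

theorem answerMaxc_ub (s : String) (n i : Int) (h2 : i < n) (j : Int) (hj : 0 ≤ j)
    (hji : j + i ≤ n) : (PySem.Str.count s (subAt s j i) : Int) ≤ answerMaxc s n i := by
  unfold answerMaxc
  cases hmx : PySem.List.max?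
      ((PySem.List.pyRange 0 (n - i + 1) 1).map (fun j => (PySem.Str.count s (subAt s j i) : Int)))
      (fun x => x) with
  | none =>
    exact absurd ((PySem.List.max?_eq_none_iff _ _).mp hmx) (maxcList_ne_nil s n i h2)
  | some m =>
    exact PySem.List.max?_isMax hmx _
      (List.mem_map.mpr ⟨j, PySem.List.mem_pyRange_one.mpr ⟨hj, by omega⟩, rfl⟩)

theorem mem_bPairs (s : String) (n i : Int) (h1 : 1 ≤ i) (h2 : i < n) :
    (answerMaxc s n i, n - i * answerMaxc s n i) ∈ bPairs s n :=
  List.mem_map.mpr ⟨i, PySem.List.mem_pyRange_one.mpr ⟨h1, h2⟩, rfl⟩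

-- ---- dict step lemmas ----

theorem step_keys_mono (s : String) (n : Int) (d : PySem.Dict String (Int × Int)) (i j : Int)
    (x : String) (hx : x ∈ d.keys) : x ∈ (answerBodyA s n d i j).keys := by
  unfold answerBodyA
  by_cases hg : (d.get? (subAt s j i)).isSome = true
  · simpa [hg] using hx
  · simp only [hg, if_neg, Bool.false_eq_true, not_false_iff]
    exact (PySem.Dict.mem_keys_insert _ _ _ _).mpr (Or.inr hx)

theorem step_nodup (s : String) (n : Int) (d : PySem.Dict String (Int × Int)) (i j : Int)
    (h : d.keys.Nodup) : (answerBodyA s n d i j).keys.Nodup := by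
  unfold answerBodyA
  by_cases hg : (d.get? (subAt s j i)).isSome = true
  · simpa [hg] using h
  · simp only [hg, if_neg, Bool.false_eq_true, not_false_iff]
    exact PySem.Dict.nodup_keys_insert _ _ _ h

theorem step_inv (s : String) (d : PySem.Dict String (Int × Int)) (i j : Int)
    (hi1 : 1 ≤ i) (hin : i < PySem.Str.len s) (hj0 : 0 ≤ j) (hjn : j < PySem.Str.len s)
    (hInv : InvD s d) (hC : ComplD s (i - 1) d) :
    InvD s (answerBodyA s (PySem.Str.len s) d i j) ∧
    subAt s j i ∈ (answerBodyA s (PySem.Str.len s) d i j).keys := by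
  unfold answerBodyA
  by_cases hg : (d.get? (subAt s j i)).isSome = true
  · rw [if_pos hg]
    refine ⟨hInv, ?_⟩
    by_contra hnm
    rw [(PySem.Dict.get?_eq_none_iff_not_mem_keys d _).mpr hnm] at hg
    simp at hg
  · rw [if_neg hg]
    have hnone : d.get? (subAt s j i) = none := by
      cases h' : d.get? (subAt s j i) with
      | none => rfl
      | some v => rw [h'] at hg; simp at hg
    have hle : j + i ≤ PySem.Str.len s := by
      by_contra hgt
      have hkey := hC (PySem.Str.len s - j) j (by omega) (by omega) hj0 (by omega)
      rw [← subAt_clamp s j i hj0 (by omega) (by omega)] at hkey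
      exact ((PySem.Dict.get?_eq_none_iff_not_mem_keys d _).mp hnone) hkey
    have hlen : PySem.Str.len (subAt s j i) = i := len_subAt s j i hj0 (by omega) hle
    constructor
    · intro p hp
      rcases (PySem.Dict.mem_items_insert d _ _ p).mp hp with hpe | ⟨hpd, _⟩
      · subst hpe
        dsimp only [ValOK]
        refine ⟨rfl, ?_, ?_, ?_, j, hj0, ?_, ?_⟩
        · rw [hlen]
        · omega
        · omega
        · omega
        · rw [hlen]
      · exact hInv p hpd
    · exact (PySem.Dict.mem_keys_insert _ _ _ _).mpr (Or.inl rfl)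

theorem foldJ_keys_mono (s : String) (i : Int) (l : List Int) :
    ∀ (d : PySem.Dict String (Int × Int)) (x : String), x ∈ d.keys →
      x ∈ ((l.foldl (fun d j => answerBodyA s (PySem.Str.len s) d i j) d).keys) := by
  induction l with
  | nil => intro d x hx; simpa using hx
  | cons a t ih =>
    intro d x hx
    exact ih _ x (step_keys_mono s (PySem.Str.len s) d i a x hx)

theorem foldJ_inv (s : String) (i : Int) (hi1 : 1 ≤ i) (hin : i < PySem.Str.len s) :
    ∀ (l : List Int) (d : PySem.Dict String (Int × Int)),
      (∀ j ∈ l, 0 ≤ j ∧ j < PySem.Str.len s) →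
      InvD s d → ComplD s (i - 1) d → d.keys.Nodup →
      InvD s (l.foldl (fun d j => answerBodyA s (PySem.Str.len s) d i j) d) ∧
      ComplD s (i - 1) (l.foldl (fun d j => answerBodyA s (PySem.Str.len s) d i j) d) ∧
      (l.foldl (fun d j => answerBodyA s (PySem.Str.len s) d i j) d).keys.Nodup := by
  intro l
  induction l with
  | nil => intro d _ h1 h2 h3; exact ⟨h1, h2, h3⟩
  | cons a t ih =>
    intro d hb h1 h2 h3
    obtain ⟨ha0, ha1⟩ := hb a List.mem_cons_self
    obtain ⟨h1', _⟩ := step_inv s d i a hi1 hin ha0 ha1 h1 h2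
    refine ih _ (fun j hj => hb j (List.mem_cons_of_mem a hj)) h1' ?_ ?_
    · intro ℓ j hℓ1 hℓ2 hj0 hj1
      exact step_keys_mono s (PySem.Str.len s) d i a _ (h2 ℓ j hℓ1 hℓ2 hj0 hj1)
    · exact step_nodup s (PySem.Str.len s) d i a h3

theorem foldJ_full (s : String) (i : Int) (hi1 : 1 ≤ i) (hin : i < PySem.Str.len s)
    (d : PySem.Dict String (Int × Int)) (h1 : InvD s d) (h2 : ComplD s (i - 1) d)
    (h3 : d.keys.Nodup) :
    InvD s ((PySem.List.pyRange 0 (PySem.Str.len s) 1).foldl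
        (fun d j => answerBodyA s (PySem.Str.len s) d i j) d) ∧
    ComplD s i ((PySem.List.pyRange 0 (PySem.Str.len s) 1).foldl
        (fun d j => answerBodyA s (PySem.Str.len s) d i j) d) ∧
    ((PySem.List.pyRange 0 (PySem.Str.len s) 1).foldl
        (fun d j => answerBodyA s (PySem.Str.len s) d i j) d).keys.Nodup := by
  have hbounds : ∀ j ∈ PySem.List.pyRange 0 (PySem.Str.len s) 1, 0 ≤ j ∧ j < PySem.Str.len s := by
    intro j hj; exact PySem.List.mem_pyRange_one.mp hj
  obtain ⟨hI, hC, hN⟩ := foldJ_inv s i hi1 hin (PySem.List.pyRange 0 (PySem.Str.len s) 1) d hbounds h1 h2 h3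
  refine ⟨hI, ?_, hN⟩
  intro ℓ j0 hℓ1 hℓ2 hj0 hj1
  by_cases hcase : ℓ ≤ i - 1
  · exact hC ℓ j0 hℓ1 hcase hj0 hj1
  · have hℓi : ℓ = i := by omega
    subst hℓi
    have hj0mem : j0 ∈ PySem.List.pyRange 0 (PySem.Str.len s) 1 :=
      PySem.List.mem_pyRange_one.mpr ⟨hj0, by omega⟩
    obtain ⟨l1, l2, hsplit⟩ := List.append_of_mem hj0mem
    rw [hsplit, List.foldl_append, List.foldl_cons]
    have hb1 : ∀ j ∈ l1, 0 ≤ j ∧ j < PySem.Str.len s := by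
      intro j hj
      exact hbounds j (by rw [hsplit]; exact List.mem_append_left _ hj)
    obtain ⟨hI1, hC1, hN1⟩ := foldJ_inv s ℓ hℓ1 (by omega) l1 d hb1 h1
      (by intro a b c e f g; exact h2 a b c (by omega) f g) h3
    obtain ⟨_, hmem⟩ := step_inv s _ ℓ j0 hℓ1 (by omega) hj0 (by omega) hI1 hC1
    exact foldJ_keys_mono s ℓ l2 _ _ hmem

theorem foldI_inv (s : String) : ∀ (k : Nat), ((k : Int) + 1 ≤ PySem.Str.len s) →
    InvD s (dAfter s ((k : Int) + 1)) ∧ ComplD s (k : Int) (dAfter s ((k : Int) + 1)) ∧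
    (dAfter s ((k : Int) + 1)).keys.Nodup := by
  intro k
  induction k with
  | zero =>
    intro _
    have hempty : dAfter s 1 = PySem.Dict.empty := by
      unfold dAfter
      rw [PySem.List.pyRange_one_eq_nil (le_refl 1)]
      rfl
    rw [Nat.cast_zero, zero_add, hempty]
    refine ⟨?_, ?_, ?_⟩
    · intro p hp
      exact absurd hp (by rw [show (PySem.Dict.empty : PySem.Dict String (Int × Int)).items = [] from rfl]; exact List.not_mem_nil)
    · intro ℓ j h1 h2 _ _; omega
    · rw [show (PySem.Dict.empty : PySem.Dict String (Int × Int)).keys = [] from rfl]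
      exact List.nodup_nil
  | succ m ih =>
    intro hle
    have hcast : ((m + 1 : Nat) : Int) = (m : Int) + 1 := by push_cast; ring
    rw [hcast]
    have hmle : (m : Int) + 1 ≤ PySem.Str.len s := by omega
    obtain ⟨hI, hC, hN⟩ := ih hmle
    have hunf : dAfter s ((m : Int) + 1 + 1) =
        (PySem.List.pyRange 0 (PySem.Str.len s) 1).foldl
          (fun d j => answerBodyA s (PySem.Str.len s) d ((m : Int) + 1) j)
          (dAfter s ((m : Int) + 1)) := by
      unfold dAfter
      rw [PySem.List.pyRange_one_succ_right (by omega : (1:Int) ≤ (m : Int) + 1),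
          List.foldl_append, List.foldl_cons, List.foldl_nil]
    rw [hunf]
    have hC' : ComplD s ((m : Int) + 1 - 1) (dAfter s ((m : Int) + 1)) := by
      intro a b c e f g; exact hC a b c (by omega) f g
    obtain ⟨hI2, hC2, hN2⟩ := foldJ_full s ((m : Int) + 1) (by omega)
      (by rw [hcast] at hle; omega) _ hI hC' hN
    exact ⟨hI2, hC2, hN2⟩

-- every candidate pair of B is one of A's stored values
theorem values_complete (s : String) (hL : 2 ≤ PySem.Str.len s)
    (hinv : InvD s (dAfter s (PySem.Str.len s)))
    (hcompl : ComplD s (PySem.Str.len s - 1) (dAfter s (PySem.Str.len s)))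
    (i : Int) (h1 : 1 ≤ i) (h2 : i < PySem.Str.len s) :
    (answerMaxc s (PySem.Str.len s) i, PySem.Str.len s - i * answerMaxc s (PySem.Str.len s) i) ∈
      (dAfter s (PySem.Str.len s)).values := by
  obtain ⟨jm, hjm0, hjm1, hjme⟩ := answerMaxc_exists s (PySem.Str.len s) i h2
  have hkey : subAt s jm i ∈ (dAfter s (PySem.Str.len s)).keys :=
    hcompl i jm h1 (by omega) hjm0 hjm1
  have hget : ∃ v, (dAfter s (PySem.Str.len s)).get? (subAt s jm i) = some v := by
    cases hg : (dAfter s (PySem.Str.len s)).get? (subAt s jm i) with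
    | none => exact absurd hkey ((PySem.Dict.get?_eq_none_iff_not_mem_keys _ _).mp hg)
    | some v => exact ⟨v, rfl⟩
  obtain ⟨v, hv⟩ := hget
  have hitem := PySem.Dict.mem_items_of_get?_eq_some _ hv
  obtain ⟨hv1, hv2, _, _, _⟩ := hinv _ hitem
  have hlen : PySem.Str.len (subAt s jm i) = i := len_subAt s jm i hjm0 (by omega) hjm1
  have hveq : v = (answerMaxc s (PySem.Str.len s) i,
      PySem.Str.len s - i * answerMaxc s (PySem.Str.len s) i) := by
    have e1 : v.1 = answerMaxc s (PySem.Str.len s) i := by rw [hv1, ← hjme]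
    have e2 : v.2 = PySem.Str.len s - i * answerMaxc s (PySem.Str.len s) i := by
      rw [hv2, hlen, e1]
    exact Prod.ext e1 e2
  rw [← hveq]
  exact List.mem_map.mpr ⟨(subAt s jm i, v), hitem, rfl⟩

-- every stored value of A is dominated by B's candidate at its own length
theorem values_dominated (s : String) (hinv : InvD s (dAfter s (PySem.Str.len s)))
    (p : Int × Int) (hp : p ∈ (dAfter s (PySem.Str.len s)).values) :
    ∃ ℓ : Int, 1 ≤ ℓ ∧ ℓ < PySem.Str.len s ∧ p.1 ≤ answerMaxc s (PySem.Str.len s) ℓ ∧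
      PySem.Str.len s - ℓ * answerMaxc s (PySem.Str.len s) ℓ ≤ p.2 := by
  obtain ⟨⟨t, q⟩, hitem, hq⟩ := List.mem_map.mp hp
  have hvk := hinv _ hitem
  obtain ⟨hv1, hv2, hℓ1, hℓ2, j, hj0, hj1, hteq⟩ := hvk
  dsimp only at hv1 hv2 hℓ1 hℓ2 hj1 hteq hq
  subst hq
  have hub := answerMaxc_ub s (PySem.Str.len s) (PySem.Str.len t) hℓ2 j hj0 hj1
  rw [← hteq] at hub
  refine ⟨PySem.Str.len t, hℓ1, hℓ2, ?_, ?_⟩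
  · rw [hv1]; exact hub
  · have hmul : PySem.Str.len t * q.1 ≤
        PySem.Str.len t * answerMaxc s (PySem.Str.len s) (PySem.Str.len t) := by
      rw [hv1]
      exact mul_le_mul_of_nonneg_left hub (by omega)
    omega

-- ---- running-best fold: min remaining, max count among ties ----

theorem extractBest_go (vs : List (Int × Int)) :
    ∀ (r c : Int), ∃ r' c',
      vs.foldl (fun b p => answerUpd b p.2 p.1) (some (r, c)) = some (r', c') ∧
      ((r', c') = (r, c) ∨ (c', r') ∈ vs) ∧ r' ≤ r ∧ (r = r' → c ≤ c') ∧
      (∀ p ∈ vs, r' ≤ p.2) ∧ (∀ p ∈ vs, p.2 = r' → p.1 ≤ c') := by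
  induction vs with
  | nil => intro r c; exact ⟨r, c, rfl, Or.inl rfl, le_refl _, fun _ => le_refl _, by simp, by simp⟩
  | cons p t ih =>
    intro r c
    simp only [List.foldl_cons]
    by_cases h1 : p.2 < r
    · have hu : answerUpd (some (r, c)) p.2 p.1 = some (p.2, p.1) := by
        simp [answerUpd, h1]
      rw [hu]
      obtain ⟨r', c', hres, hmem, hle, hcle, hall, hmax⟩ := ih p.2 p.1
      refine ⟨r', c', hres, ?_, by omega, by omega, ?_, ?_⟩
      · rcases hmem with heq | hmem
        · have e1 : r' = p.2 := congrArg Prod.fst heq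
          have e2 : c' = p.1 := congrArg Prod.snd heq
          exact Or.inr (List.mem_cons.mpr (Or.inl (by rw [e1, e2])))
        · exact Or.inr (List.mem_cons.mpr (Or.inr hmem))
      · intro q hq
        rcases List.mem_cons.mp hq with rfl | hq
        · exact hle
        · exact hall _ hq
      · intro q hq hq2
        rcases List.mem_cons.mp hq with rfl | hq
        · exact hcle hq2
        · exact hmax _ hq hq2
    · by_cases h2 : p.2 = r ∧ c < p.1
      · have hu : answerUpd (some (r, c)) p.2 p.1 = some (p.2, p.1) := by
          simp [answerUpd, h2.1, h2.2]
        rw [hu]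
        obtain ⟨r', c', hres, hmem, hle, hcle, hall, hmax⟩ := ih p.2 p.1
        refine ⟨r', c', hres, ?_, by omega, ?_, ?_, ?_⟩
        · rcases hmem with heq | hmem
          · have e1 : r' = p.2 := congrArg Prod.fst heq
            have e2 : c' = p.1 := congrArg Prod.snd heq
            exact Or.inr (List.mem_cons.mpr (Or.inl (by rw [e1, e2])))
          · exact Or.inr (List.mem_cons.mpr (Or.inr hmem))
        · intro hre
          have := hcle (by omega)
          omega
        · intro q hq
          rcases List.mem_cons.mp hq with rfl | hq
          · exact hle
          · exact hall _ hq
        · intro q hq hq2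
          rcases List.mem_cons.mp hq with rfl | hq
          · exact hcle hq2
          · exact hmax _ hq hq2
      · have hcond : ¬ (p.2 < r ∨ (p.2 = r ∧ c < p.1)) := not_or.mpr ⟨h1, h2⟩
        have hu : answerUpd (some (r, c)) p.2 p.1 = some (r, c) := by
          simp only [answerUpd, if_neg hcond]
        rw [hu]
        obtain ⟨r', c', hres, hmem, hle, hcle, hall, hmax⟩ := ih r c
        refine ⟨r', c', hres, ?_, hle, hcle, ?_, ?_⟩
        · rcases hmem with heq | hmem
          · exact Or.inl heq
          · exact Or.inr (List.mem_cons.mpr (Or.inr hmem))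
        · intro q hq
          rcases List.mem_cons.mp hq with rfl | hq
          · omega
          · exact hall _ hq
        · intro q hq hq2
          rcases List.mem_cons.mp hq with rfl | hq
          · have hnc : ¬ c < q.1 := fun hcl => h2 ⟨by omega, hcl⟩
            have := hcle (by omega)
            omega
          · exact hmax _ hq hq2

theorem extractBest_spec (vs : List (Int × Int)) (hne : vs ≠ []) :
    ∃ r' c', extractBest vs = some (r', c') ∧ (c', r') ∈ vs ∧
      (∀ p ∈ vs, r' ≤ p.2) ∧ (∀ p ∈ vs, p.2 = r' → p.1 ≤ c') := by
  cases vs with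
  | nil => exact absurd rfl hne
  | cons p t =>
    unfold extractBest
    simp only [List.foldl_cons]
    have h0 : answerUpd none p.2 p.1 = some (p.2, p.1) := rfl
    rw [h0]
    obtain ⟨r', c', hres, hmem, hle, hcle, hall, hmax⟩ := extractBest_go t p.2 p.1
    refine ⟨r', c', hres, ?_, ?_, ?_⟩
    · rcases hmem with heq | hmem
      · have e1 : r' = p.2 := congrArg Prod.fst heq
        have e2 : c' = p.1 := congrArg Prod.snd heq
        exact List.mem_cons.mpr (Or.inl (by rw [e1, e2]))
      · exact List.mem_cons.mpr (Or.inr hmem)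
    · intro q hq
      rcases List.mem_cons.mp hq with rfl | hq
      · exact hle
      · exact hall _ hq
    · intro q hq hq2
      rcases List.mem_cons.mp hq with rfl | hq
      · exact hcle hq2
      · exact hmax _ hq hq2

-- A's select phase (sort by remainder, take counts tying the head, max) returns the
-- count c' of any pair that is minimal in remainder and maximal among the ties
theorem answer_select (vs : List (Int × Int)) (r' c' : Int)
    (hmem : (c', r') ∈ vs) (hall : ∀ p ∈ vs, r' ≤ p.2) (hmax : ∀ p ∈ vs, p.2 = r' → p.1 ≤ c')
    (m : Int × Int) (t : List (Int × Int))
    (hs : PySem.List.sorted vs (fun p => p.2) false = m :: t) :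
    PySem.List.max?
      (PySem.Set.ofList (((m :: t).filter (fun p => p.2 == m.2)).map (fun p => p.1)))
      (fun x => x) = some c' := by
  have hmle : ∀ y ∈ vs, m.2 ≤ y.2 := PySem.List.key_head_sorted_le vs (fun p => p.2) hs
  have hminmem : m ∈ vs := by
    have : m ∈ PySem.List.sorted vs (fun p => p.2) false := by rw [hs]; exact List.mem_cons_self
    exact (PySem.List.mem_sorted vs (fun p => p.2) false m).mp this
  have hm2 : m.2 = r' := le_antisymm (hmle _ hmem) (hall _ hminmem)
  have hc'L : c' ∈ ((m :: t).filter (fun p => p.2 == m.2)).map (fun p => p.1) := by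
    refine List.mem_map.mpr ⟨(c', r'), ?_, rfl⟩
    refine List.mem_filter.mpr ⟨?_, by simp [hm2]⟩
    rw [← hs]
    exact (PySem.List.mem_sorted vs (fun p => p.2) false _).mpr hmem
  have hub : ∀ y ∈ ((m :: t).filter (fun p => p.2 == m.2)).map (fun p => p.1), y ≤ c' := by
    intro y hy
    obtain ⟨q, hqf, rfl⟩ := List.mem_map.mp hy
    obtain ⟨hqmem, hq2⟩ := List.mem_filter.mp hqf
    have hqvs : q ∈ vs := by
      rw [← hs] at hqmem
      exact (PySem.List.mem_sorted vs (fun p => p.2) false q).mp hqmem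
    exact hmax _ hqvs (by have := beq_iff_eq.mp hq2; omega)
  cases hmx : PySem.List.max?
      (PySem.Set.ofList (((m :: t).filter (fun p => p.2 == m.2)).map (fun p => p.1)))
      (fun x => x) with
  | none =>
    have := (PySem.List.max?_eq_none_iff _ _).mp hmx
    have hcmem := (PySem.Set.mem_ofList _ c').mpr hc'L
    rw [this] at hcmem
    exact absurd hcmem (List.not_mem_nil)
  | some mx =>
    have hmxmem : mx ∈ _ := PySem.List.max?_mem hmx
    have hmxub : c' ≤ mx := PySem.List.max?_isMax hmx c' ((PySem.Set.mem_ofList _ c').mpr hc'L)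
    have hmxle : mx ≤ c' := hub _ ((PySem.Set.mem_ofList _ mx).mp hmxmem)
    have : mx = c' := le_antisymm hmxle hmxub
    rw [this]

theorem answer_eq_alt (s : String) (hpre : PySem.Str.len s ≠ 1) : answer s = answer_alt s := by
  unfold answer answer_alt
  by_cases hc : s ≠ "" ∧ PySem.Str.len s < 200
  · rw [if_pos hc, if_pos hc]
    simp only []
    have hL1 : 1 ≤ PySem.Str.len s := by
      rw [PySem.Str.len_eq]
      have : s.toList ≠ [] := fun h => hc.1 (String.toList_inj.mp h)
      cases h' : s.toList with
      | nil => exact absurd h' this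
      | cons a t => simp
    have hL2 : 2 ≤ PySem.Str.len s := by omega
    -- invariants of A's finished dict
    obtain ⟨hI, hC, hN⟩ := foldI_inv s (PySem.Str.len s - 1).toNat
      (by omega)
    rw [show (((PySem.Str.len s - 1).toNat : Int) + 1) = PySem.Str.len s by omega] at hI hC hN
    rw [show ((PySem.Str.len s - 1).toNat : Int) = PySem.Str.len s - 1 by omega] at hC
    -- B's fold is extractBest of the candidate pairs
    have hBfold : (PySem.List.pyRange 1 (PySem.Str.len s) 1).foldl
        (fun b i => answerUpd b (PySem.Str.len s - i * answerMaxc s (PySem.Str.len s) i)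
          (answerMaxc s (PySem.Str.len s) i)) none = extractBest (bPairs s (PySem.Str.len s)) := by
      unfold extractBest bPairs
      rw [List.foldl_map]
    have hbne : bPairs s (PySem.Str.len s) ≠ [] := by
      unfold bPairs
      rw [PySem.List.pyRange_one_cons (show (1:Int) < PySem.Str.len s by omega)]
      simp
    obtain ⟨rB, cB, hext, hmemB, hminB, htieB⟩ := extractBest_spec (bPairs s (PySem.Str.len s)) hbne
    rw [hBfold, hext]
    -- the optimal pair of B is a stored value of A, minimal and tie-maximal there
    have hmemA : (cB, rB) ∈ (dAfter s (PySem.Str.len s)).values := by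
      obtain ⟨i, hir, hie⟩ := List.mem_map.mp hmemB
      obtain ⟨hi1, hi2⟩ := PySem.List.mem_pyRange_one.mp hir
      have := values_complete s hL2 hI hC i hi1 hi2
      rwa [hie] at this
    have hminA : ∀ p ∈ (dAfter s (PySem.Str.len s)).values, rB ≤ p.2 := by
      intro p hp
      obtain ⟨ℓ, hℓ1, hℓ2, _, hrem⟩ := values_dominated s hI p hp
      have := hminB _ (mem_bPairs s (PySem.Str.len s) ℓ hℓ1 hℓ2)
      omega
    have htieA : ∀ p ∈ (dAfter s (PySem.Str.len s)).values, p.2 = rB → p.1 ≤ cB := by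
      intro p hp hpr
      obtain ⟨ℓ, hℓ1, hℓ2, hcnt, hrem⟩ := values_dominated s hI p hp
      have hmemℓ := mem_bPairs s (PySem.Str.len s) ℓ hℓ1 hℓ2
      have h1 := hminB _ hmemℓ
      have h2 := htieB _ hmemℓ (by simp only []; omega)
      omega
    -- A's match on the sorted value list
    have hA : (match PySem.List.sorted (dAfter s (PySem.Str.len s)).values (fun p => p.2) false with
        | [] => (0 : Int)
        | m :: t =>
          match PySem.List.max?
              (PySem.Set.ofList (((m :: t).filter (fun p => p.2 == m.2)).map (fun p => p.1)))
              (fun x => x) with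
          | some mx => mx
          | none => 0) = cB := by
      cases hs : PySem.List.sorted (dAfter s (PySem.Str.len s)).values (fun p => p.2) false with
      | nil =>
        have := (PySem.List.sorted_eq_nil_iff _ _ _).mp hs
        rw [this] at hmemA
        exact absurd hmemA (List.not_mem_nil)
      | cons m t =>
        show (match PySem.List.max?
            (PySem.Set.ofList (((m :: t).filter (fun p => p.2 == m.2)).map (fun p => p.1)))
            (fun x => x) with
          | some mx => mx
          | none => 0) = cB
        rw [answer_select (dAfter s (PySem.Str.len s)).values rB cB hmemA hminA htieA m t hs]
    exact hA
  · rw [if_neg hc, if_neg hc]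

-- ===== VERDICT (by name: the statements are the Claim_ definitions above) =====
theorem answer_spec : Claim_equal_answer := by
  intro s _ hpre
  unfold Spec_answer
  exact answer_eq_alt s hpre
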